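-- pv_equiv track=rewrite | github.com/ISE-Research/NotebookCU | src/core/cell_metrics.py | extract_header3_count
-- ===== SOURCE A (Python) =====
-- def extract_header3_count(text: str) -> int:
--     count = 0
--     if text[0:4] == "### ":
--         count += 1
--     for i in range(len(text) - 3):
--         if text[i : i + 5] == " ### " or text[i : i + 5] == "\n### ":
--             count += 1
--     return count
-- ===== SOURCE B (Python) =====
-- def extract_header3_count(text: str) -> int:
--     # single-pass DFA: state 1 = at a boundary (start/space/newline), 2-4 = one-three hash marks seen since a boundary, 0 = mid-word
--     count = 0
--     s = 1
--     for c in text: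
--         if s == 4 and c == ' ':
--             count += 1
--             s = 1
--         elif c == ' ' or c == '\n':
--             s = 1
--         elif c == '#':
--             s = s + 1 if 1 <= s <= 3 else 0
--         else:
--             s = 0
--     return count
-- ===== Notes on version B (the rewrite author's own statement) =====
-- stated objective: alternative
-- what changed: Replaced A's per-index 5-character window slicing (plus a separate start-of-string special case) by a single left-to-right pass of a 5-state character DFA that tracks boundary and hash-prefix state, doing constant work per character with no slicing.
import Mathlib
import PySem

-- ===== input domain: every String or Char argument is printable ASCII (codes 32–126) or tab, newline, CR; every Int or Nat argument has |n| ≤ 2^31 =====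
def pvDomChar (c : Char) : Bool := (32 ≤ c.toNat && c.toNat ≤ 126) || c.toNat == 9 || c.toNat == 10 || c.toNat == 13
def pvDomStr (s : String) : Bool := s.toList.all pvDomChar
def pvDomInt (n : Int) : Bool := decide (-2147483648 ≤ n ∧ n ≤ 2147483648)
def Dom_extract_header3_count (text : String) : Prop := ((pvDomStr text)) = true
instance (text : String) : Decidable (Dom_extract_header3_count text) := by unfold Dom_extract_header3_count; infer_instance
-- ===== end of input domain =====

-- B replaces A's per-index 5-char window scan by a single left-to-right pass of a 5-state
-- character DFA (no slicing, constant work per character); objective: alternative.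

-- ===== PORT A =====
def extract_header3_count (text : String) : Int :=
  let cs := text.toList
  let count : Int := 0
  let count := if PySem.List.slice cs (some 0) (some 4) = ['#', '#', '#', ' '] then count + 1 else count
  (PySem.List.pyRange 0 ((cs.length : Int) - 3) 1).foldl
    (fun count i =>
      if PySem.List.slice cs (some i) (some (i + 5)) = [' ', '#', '#', '#', ' ']
          ∨ PySem.List.slice cs (some i) (some (i + 5)) = ['\n', '#', '#', '#', ' '] then
        count + 1
      else count)
    count

-- ===== PORT B =====
-- DFA state s : 1 = at a boundary (start/space/newline), 2..4 = one..three hash marks seen since a boundary, 0 = mid-word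
def h3step (st : Int × Nat) (c : Char) : Int × Nat :=
  if st.2 = 4 ∧ c = ' ' then (st.1 + 1, 1)
  else if c = ' ' ∨ c = '\n' then (st.1, 1)
  else if c = '#' then (st.1, if 1 ≤ st.2 ∧ st.2 ≤ 3 then st.2 + 1 else 0)
  else (st.1, 0)

def extract_header3_count_alt (text : String) : Int :=
  (text.toList.foldl h3step (0, 1)).1

-- ===== PRECONDITION & SPEC =====
def Spec_extract_header3_count (text : String) (out : Int) : Prop := out = extract_header3_count_alt text
instance (text : String) (out : Int) : Decidable (Spec_extract_header3_count text out) := by unfold Spec_extract_header3_count; infer_instance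

-- ===== CLAIM (what is proved, stated in full; the proofs are below) =====
def Claim_equal_extract_header3_count : Prop := ∀ (text : String), Dom_extract_header3_count text → Spec_extract_header3_count text (extract_header3_count text)

-- ===== LEMMAS AND PROOFS =====

-- windows count, structurally: one indicator per suffix
def wr : List Char → Int
  | [] => 0
  | c :: rest =>
      (if (c :: rest).take 5 = [' ', '#', '#', '#', ' '] ∨ (c :: rest).take 5 = ['\n', '#', '#', '#', ' '] then 1 else 0)
        + wr rest

-- headers count with an explicit "previous char is a boundary" flag
def cnt : List Char → Bool → Int
  | [], _ => 0
  | c :: rest, b =>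
      (if b = true ∧ c = '#' ∧ rest.take 3 = ['#', '#', ' '] then 1 else 0)
        + cnt rest (decide (c = ' ' ∨ c = '\n'))

-- pending completions of a partially read header token for each DFA state
def pend : Nat → List Char → Int
  | 2, l => if l.take 3 = ['#', '#', ' '] then 1 else 0
  | 3, l => if l.take 2 = ['#', ' '] then 1 else 0
  | 4, l => if l.take 1 = [' '] then 1 else 0
  | _, _ => 0

lemma pend_nil (s : Nat) : pend s [] = 0 := by
  match s with
  | 0 => rfl
  | 1 => rfl
  | 2 => simp [pend]
  | 3 => simp [pend]
  | 4 => simp [pend]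
  | (n+5) => rfl

lemma dfa_run (l : List Char) : ∀ (s : Nat) (acc : Int), s ≤ 4 →
    (l.foldl h3step (acc, s)).1 = acc + pend s l + cnt l (s == 1) := by
  induction l with
  | nil => intro s acc hs; simp [cnt, pend_nil]
  | cons c rest ih =>
    intro s acc hs
    rw [List.foldl_cons]
    interval_cases s <;>
      by_cases h1 : c = ' ' <;> by_cases h2 : c = '\n' <;> by_cases h3 : c = '#' <;>
        simp_all [h3step, pend, cnt] <;> ring

lemma cnt_take (l : List Char) : ∀ b : Bool,
    cnt l b = (if b = true ∧ l.take 4 = ['#', '#', '#', ' '] then 1 else 0) + wr l := by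
  induction l with
  | nil => intro b; simp [cnt, wr]
  | cons c rest ih =>
    intro b
    by_cases h1 : c = ' ' <;> by_cases h2 : c = '\n' <;> by_cases h3 : c = '#' <;>
      simp_all [cnt, wr]

lemma window_sum (l : List Char) :
    ((PySem.List.pyRange 0 ((l.length : Int) - 3) 1).map
        (fun i => if PySem.List.slice l (some i) (some (i + 5)) = [' ', '#', '#', '#', ' ']
            ∨ PySem.List.slice l (some i) (some (i + 5)) = ['\n', '#', '#', '#', ' '] then (1 : Int) else 0)).sum
      = wr l := by
  induction l with
  | nil => rw [PySem.List.pyRange_one_eq_nil (by norm_num)]; simp [wr]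
  | cons c rest ih =>
    by_cases hm : (3 : Int) ≤ (rest.length : Int)
    · have hlen : ((c :: rest).length : Int) - 3 = ((rest.length : Int) - 3) + 1 := by
        simp; ring
      rw [PySem.List.pyRange_one_cons (by simp; omega)]
      rw [List.map_cons, List.sum_cons]
      -- head window = take 5
      have hslice0 : PySem.List.slice (c :: rest) (some 0) (some (0 + 5)) = (c :: rest).take 5 := by
        rw [PySem.List.slice_zero_start, show ((0 : Int) + 5) = ((5 : Nat) : Int) by norm_num,
          PySem.List.slice_to_natCast]
      -- shift the remaining windows down to `rest`
      have hshift :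
          ((PySem.List.pyRange (0 + 1) (((c :: rest).length : Int) - 3) 1).map
              (fun i => if PySem.List.slice (c :: rest) (some i) (some (i + 5)) = [' ', '#', '#', '#', ' ']
                  ∨ PySem.List.slice (c :: rest) (some i) (some (i + 5)) = ['\n', '#', '#', '#', ' '] then (1 : Int) else 0)).sum
            = ((PySem.List.pyRange 0 ((rest.length : Int) - 3) 1).map
              (fun i => if PySem.List.slice rest (some i) (some (i + 5)) = [' ', '#', '#', '#', ' ']
                  ∨ PySem.List.slice rest (some i) (some (i + 5)) = ['\n', '#', '#', '#', ' '] then (1 : Int) else 0)).sum := by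
        rw [PySem.List.pyRange_one, PySem.List.pyRange_one]
        have hK : (((c :: rest).length : Int) - 3 - (0 + 1)).toNat = (((rest.length : Int) - 3) - 0).toNat := by
          simp; omega
        rw [hK, List.map_map, List.map_map]
        apply congrArg
        apply List.map_congr_left
        intro k _
        have e1 : ((0 : Int) + 1 + (k : Int)) = (((k + 1 : Nat)) : Int) := by omega
        have e2 : ((0 : Int) + (k : Int)) = ((k : Nat) : Int) := by omega
        simp only [Function.comp_apply, e1, e2]
        rw [show (((k + 1 : Nat) : Int) + 5) = (((k + 1 : Nat) : Int) + ((5 : Nat) : Int)) by norm_num,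
          PySem.List.slice_natCast_add]
        rw [show (((k : Nat) : Int) + 5) = (((k : Nat) : Int) + ((5 : Nat) : Int)) by norm_num,
          PySem.List.slice_natCast_add]
        simp [List.drop_succ_cons]
      rw [hshift, ih, hslice0]
      simp [wr]
    · rw [PySem.List.pyRange_one_eq_nil (by simp; omega)]
      have hr : wr rest = 0 := by
        rw [← ih, PySem.List.pyRange_one_eq_nil (by omega)]
        simp
      have h5 : ((c :: rest).length) < 5 := by simp; omega
      have h4 : rest.take 4 ≠ ['#', '#', '#', ' '] := by
        intro he
        have := congrArg List.length he
        simp at this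
        omega
      simp [wr, hr, h4]

lemma portA_eq_cnt (text : String) : extract_header3_count text = cnt text.toList true := by
  simp only [extract_header3_count]
  have hfun : (fun (count : Int) (i : Int) =>
      if PySem.List.slice text.toList (some i) (some (i + 5)) = [' ', '#', '#', '#', ' ']
          ∨ PySem.List.slice text.toList (some i) (some (i + 5)) = ['\n', '#', '#', '#', ' '] then
        count + 1
      else count)
      = (fun (count : Int) (i : Int) => count +
          (fun i => if PySem.List.slice text.toList (some i) (some (i + 5)) = [' ', '#', '#', '#', ' ']
              ∨ PySem.List.slice text.toList (some i) (some (i + 5)) = ['\n', '#', '#', '#', ' '] then (1 : Int) else 0) i) := by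
    funext count i
    by_cases h : PySem.List.slice text.toList (some i) (some (i + 5)) = [' ', '#', '#', '#', ' ']
        ∨ PySem.List.slice text.toList (some i) (some (i + 5)) = ['\n', '#', '#', '#', ' '] <;>
      simp [h]
  rw [hfun, PySem.List.foldl_add, window_sum]
  have hslice4 : PySem.List.slice text.toList (some 0) (some 4) = text.toList.take 4 := by
    rw [PySem.List.slice_zero_start, show ((4 : Int)) = ((4 : Nat) : Int) by norm_num,
      PySem.List.slice_to_natCast]
  rw [cnt_take, hslice4]
  split <;> simp_all

lemma portB_eq_cnt (text : String) : extract_header3_count_alt text = cnt text.toList true := by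
  unfold extract_header3_count_alt
  rw [dfa_run text.toList 1 0 (by omega)]
  simp [pend]

-- ===== VERDICT (by name: the statement is the Claim_ definition above) =====
theorem extract_header3_count_spec : Claim_equal_extract_header3_count := by
  intro text _
  unfold Spec_extract_header3_count
  rw [portA_eq_cnt, portB_eq_cnt]
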